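-- pv_equiv track=rewrite | github.com/ignaciosim/AI4Chips_SLR | analysis/citation_network.py | find_circular_pairs
-- ===== SOURCE A (Python) =====
-- def find_circular_pairs(adj: dict[str, list[str]]) -> list[tuple[str, str]]:
--     """Return sorted list of (doi_a, doi_b) where A cites B AND B cites A."""
--     edges = set()
--     for src, targets in adj.items():
--         for tgt in targets:
--             edges.add((src, tgt))
--     pairs = set()
--     for a, b in edges:
--         if (b, a) in edges:
--             pair = tuple(sorted([a, b]))
--             pairs.add(pair)
--     return sorted(pairs)
-- ===== SOURCE B (Python) =====
-- def find_circular_pairs(adj: dict[str, list[str]]) -> list[tuple[str, str]]: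
--     """Return sorted list of (doi_a, doi_b) where A cites B AND B cites A."""
--     # Canonicalize every edge to its sorted pair, tagged by direction:
--     # fwd holds pairs coming from edges src<=tgt, bwd those from edges tgt<=src.
--     # A pair is mutual iff it occurs in both lists; intersect them by
--     # sorting each deduplicated list and merging with two pointers.
--     fwd = []
--     bwd = []
--     for src, targets in adj.items():
--         for tgt in targets:
--             if src <= tgt:
--                 fwd.append((src, tgt))
--             if tgt <= src:
--                 bwd.append((tgt, src))
--     f = sorted(set(fwd))
--     b = sorted(set(bwd))
--     out = []
--     i = j = 0
--     while i < len(f) and j < len(b):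
--         if f[i] == b[j]:
--             out.append(f[i])
--             i += 1
--             j += 1
--         elif f[i] < b[j]:
--             i += 1
--         else:
--             j += 1
--     return out
-- ===== Notes on version B (the rewrite author's own statement) =====
-- stated objective: alternative
-- what changed: B replaces A's global edge set and reverse-edge membership scan by a sort-and-merge intersection: every edge is canonicalised into a direction-tagged pair, the two tag classes are deduplicated and sorted, and a two-pointer merge emits exactly the pairs present in both.
import Mathlib
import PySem

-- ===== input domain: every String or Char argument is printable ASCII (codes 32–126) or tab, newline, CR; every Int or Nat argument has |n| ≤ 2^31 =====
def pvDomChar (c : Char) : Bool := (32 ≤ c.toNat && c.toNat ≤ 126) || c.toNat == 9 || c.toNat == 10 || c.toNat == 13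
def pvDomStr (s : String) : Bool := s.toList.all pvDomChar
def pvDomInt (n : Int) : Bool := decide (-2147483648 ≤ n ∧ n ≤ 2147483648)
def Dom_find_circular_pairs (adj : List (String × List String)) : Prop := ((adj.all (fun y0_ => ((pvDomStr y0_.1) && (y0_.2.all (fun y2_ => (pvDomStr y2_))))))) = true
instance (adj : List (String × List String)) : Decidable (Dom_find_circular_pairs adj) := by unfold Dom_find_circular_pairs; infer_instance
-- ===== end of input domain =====

-- B replaces A's global edge set and reverse-edge membership scan by a sort-and-merge
-- intersection: each edge is canonicalised with a direction tag, the two tag classes are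
-- sorted, and a two-pointer merge emits the pairs present in both (objective: alternative).

-- ===== PORT A =====
def find_circular_pairs (adj : List (String × List String)) : List (String × String) :=
  -- edges = set(); for src, targets in adj.items(): for tgt in targets: edges.add((src, tgt))
  let edges : PySem.Set (String × String) :=
    adj.foldl (fun ed p => p.2.foldl (fun ed tgt => PySem.Set.add ed (p.1, tgt)) ed) PySem.Set.empty
  -- pairs = set(); for a, b in edges: if (b, a) in edges: pairs.add(tuple(sorted([a, b])))
  -- (the final result is sorted, so iterating `edges` in insertion order is exact;
  --  tuple(sorted([a, b])) on two strings = if a ≤ b then (a, b) else (b, a), codepoint order)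
  let pairs : PySem.Set (String × String) :=
    edges.foldl (fun ps ab =>
      if (ab.2, ab.1) ∈ edges then
        PySem.Set.add ps (if ab.1 ≤ ab.2 then (ab.1, ab.2) else (ab.2, ab.1))
      else ps) PySem.Set.empty
  PySem.List.sorted2 pairs (fun x => x.1) (fun x => x.2) false

-- ===== PORT B =====
-- the two-pointer merge loop of Source B: while i < len(f) and j < len(b): …
-- (the while loop over indices i, j is transcribed as recursion on the two suffixes;
--  Python's tuple comparison f[i] < b[j] is lexicographic = toLex on the pair)
def pvMerge : List (String × String) → List (String × String) → List (String × String)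
  | [], _ => []
  | _ :: _, [] => []
  | x :: xs, y :: ys =>
    if x = y then x :: pvMerge xs ys
    else if toLex x < toLex y then pvMerge xs (y :: ys)
    else pvMerge (x :: xs) ys

def find_circular_pairs_alt (adj : List (String × List String)) : List (String × String) :=
  -- fwd = []; bwd = []
  -- for src, targets in adj.items(): for tgt in targets:
  --   if src <= tgt: fwd.append((src, tgt))
  --   if tgt <= src: bwd.append((tgt, src))
  let fb : List (String × String) × List (String × String) :=
    adj.foldl (fun fb p =>
      p.2.foldl (fun fb tgt =>
        (if p.1 ≤ tgt then fb.1 ++ [(p.1, tgt)] else fb.1,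
         if tgt ≤ p.1 then fb.2 ++ [(tgt, p.1)] else fb.2)) fb) ([], [])
  -- f = sorted(set(fwd)); b = sorted(set(bwd))
  let f := PySem.List.sorted2 (PySem.Set.ofList fb.1) (fun x => x.1) (fun x => x.2) false
  let b := PySem.List.sorted2 (PySem.Set.ofList fb.2) (fun x => x.1) (fun x => x.2) false
  pvMerge f b

-- ===== SPEC =====
def Spec_find_circular_pairs (adj : List (String × List String)) (out : List (String × String)) : Prop := out = find_circular_pairs_alt adj
instance (adj : List (String × List String)) (out : List (String × String)) : Decidable (Spec_find_circular_pairs adj out) := by unfold Spec_find_circular_pairs; infer_instance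

-- ===== CLAIM (what is proved, stated in full; the proofs are below) =====
def Claim_equal_find_circular_pairs : Prop := ∀ (adj : List (String × List String)), Dom_find_circular_pairs adj → Spec_find_circular_pairs adj (find_circular_pairs adj)

-- ===== LEMMAS AND PROOFS =====

-- the mutual-citation relation both programs detect
def pvEdge (adj : List (String × List String)) (x y : String) : Prop :=
  ∃ ts, (x, ts) ∈ adj ∧ y ∈ ts

-- membership in a fold of conditional Set.adds (A's pairs loop)
theorem pv_mem_foldl_addIf {β α : Type} [BEq α] [LawfulBEq α] (l : List β)
    (c : β → Prop) [DecidablePred c] (f : β → α) (s : PySem.Set α) (q : α) :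
    q ∈ l.foldl (fun s b => if c b then PySem.Set.add s (f b) else s) s ↔
      q ∈ s ∨ ∃ b ∈ l, c b ∧ q = f b := by
  induction l generalizing s with
  | nil => simp
  | cons b t ih =>
    simp only [List.foldl_cons, ih, List.mem_cons]
    by_cases h : c b <;> simp [h, PySem.Set.mem_add] ; tauto

theorem pv_nodup_foldl_addIf {β α : Type} [BEq α] [LawfulBEq α] (l : List β)
    (c : β → Prop) [DecidablePred c] (f : β → α) (s : PySem.Set α) (hs : s.Nodup) :
    (l.foldl (fun s b => if c b then PySem.Set.add s (f b) else s) s).Nodup := by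
  induction l generalizing s with
  | nil => exact hs
  | cons b t ih =>
    simp only [List.foldl_cons]
    exact ih _ (by by_cases h : c b <;> simp [h, PySem.Set.nodup_add _ _ hs, hs])

-- A's edge-set fold
theorem pv_mem_edgesFold (adj : List (String × List String))
    (s : PySem.Set (String × String)) (e : String × String) :
    e ∈ adj.foldl (fun ed p => p.2.foldl (fun ed tgt => PySem.Set.add ed (p.1, tgt)) ed) s ↔
      e ∈ s ∨ ∃ p ∈ adj, ∃ t ∈ p.2, e = (p.1, t) := by
  induction adj generalizing s with
  | nil => simp
  | cons p l ih =>
    simp only [List.foldl_cons, ih, PySem.Set.mem_foldl_add, List.mem_cons]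
    constructor
    · rintro (⟨h | ⟨b, hb, rfl⟩⟩ | ⟨r, hr, t, ht, rfl⟩)
      · exact Or.inl h
      · exact Or.inr ⟨p, Or.inl rfl, b, hb, rfl⟩
      · exact Or.inr ⟨r, Or.inr hr, t, ht, rfl⟩
    · rintro (h | ⟨r, (rfl | hr), t, ht, rfl⟩)
      · exact Or.inl (Or.inl h)
      · exact Or.inl (Or.inr ⟨t, ht, rfl⟩)
      · exact Or.inr ⟨r, hr, t, ht, rfl⟩

-- B's tagging loop: closed form of the pair-of-lists fold (inner loop first)
theorem pv_fbInner (src : String) (ts : List String)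
    (fb : List (String × String) × List (String × String)) :
    ts.foldl (fun fb tgt =>
        (if src ≤ tgt then fb.1 ++ [(src, tgt)] else fb.1,
         if tgt ≤ src then fb.2 ++ [(tgt, src)] else fb.2)) fb =
      (fb.1 ++ (ts.filter (fun t => src ≤ t)).map (fun t => (src, t)),
       fb.2 ++ (ts.filter (fun t => t ≤ src)).map (fun t => (t, src))) := by
  induction ts generalizing fb with
  | nil => simp
  | cons t ts ih =>
    simp only [List.foldl_cons, ih, List.filter_cons]
    by_cases h1 : src ≤ t <;> by_cases h2 : t ≤ src <;>
      simp [h1, h2, List.append_assoc]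

theorem pv_fbFold (adj : List (String × List String))
    (fb : List (String × String) × List (String × String)) :
    adj.foldl (fun fb p =>
        p.2.foldl (fun fb tgt =>
          (if p.1 ≤ tgt then fb.1 ++ [(p.1, tgt)] else fb.1,
           if tgt ≤ p.1 then fb.2 ++ [(tgt, p.1)] else fb.2)) fb) fb =
      (fb.1 ++ adj.flatMap (fun p => (p.2.filter (fun t => p.1 ≤ t)).map (fun t => (p.1, t))),
       fb.2 ++ adj.flatMap (fun p => (p.2.filter (fun t => t ≤ p.1)).map (fun t => (t, p.1)))) := by
  induction adj generalizing fb with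
  | nil => simp
  | cons p l ih =>
    rw [List.foldl_cons, pv_fbInner, ih]
    simp [List.flatMap_cons]

theorem pv_mem_fwd (adj : List (String × List String)) (q : String × String) :
    q ∈ adj.flatMap (fun p => (p.2.filter (fun t => p.1 ≤ t)).map (fun t => (p.1, t))) ↔
      q.1 ≤ q.2 ∧ pvEdge adj q.1 q.2 := by
  unfold pvEdge
  simp only [List.mem_flatMap, List.mem_map, List.mem_filter, decide_eq_true_eq]
  constructor
  · rintro ⟨p, hp, t, ⟨ht, hle⟩, rfl⟩
    exact ⟨hle, p.2, by simpa using hp, ht⟩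
  · rintro ⟨hle, ts, hts, ht⟩
    exact ⟨(q.1, ts), hts, q.2, ⟨ht, hle⟩, rfl⟩

theorem pv_mem_bwd (adj : List (String × List String)) (q : String × String) :
    q ∈ adj.flatMap (fun p => (p.2.filter (fun t => t ≤ p.1)).map (fun t => (t, p.1))) ↔
      q.1 ≤ q.2 ∧ pvEdge adj q.2 q.1 := by
  unfold pvEdge
  simp only [List.mem_flatMap, List.mem_map, List.mem_filter, decide_eq_true_eq]
  constructor
  · rintro ⟨p, hp, t, ⟨ht, hle⟩, rfl⟩
    exact ⟨hle, p.2, by simpa using hp, ht⟩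
  · rintro ⟨hle, ts, hts, ht⟩
    exact ⟨(q.2, ts), hts, q.1, ⟨ht, hle⟩, rfl⟩

-- sorted2 on pairs of strings is sorted with the lexicographic key
theorem pv_sorted2_eq_sorted_lex (xs : List (String × String)) :
    PySem.List.sorted2 xs (fun x => x.1) (fun x => x.2) false
      = PySem.List.sorted xs (fun x => toLex x) false := by
  unfold PySem.List.sorted2 PySem.List.sorted
  have h : ∀ a b : String × String,
      (decide (a.1 < b.1) || (!decide (b.1 < a.1) && decide (a.2 < b.2)))
        = decide (toLex a < toLex b) := by
    intro a b
    rcases lt_trichotomy a.1 b.1 with h1 | h1 | h1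
    · simp [Prod.Lex.toLex_lt_toLex, h1, lt_asymm h1]
    · simp [Prod.Lex.toLex_lt_toLex, h1]
    · simp [Prod.Lex.toLex_lt_toLex, h1, lt_asymm h1, ne_of_gt h1]
  simp only [if_neg, Bool.false_eq_true, not_false_iff, h]

-- sorted(set(xs)) of pairs is strictly increasing in the lexicographic order
theorem pv_sortedSet_strict (xs : List (String × String)) :
    (PySem.List.sorted (PySem.Set.ofList xs) (fun x => toLex x) false).Pairwise
      (fun a b => toLex a < toLex b) := by
  have hle := PySem.List.sorted_pairwise (PySem.Set.ofList xs) (fun x => toLex x)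
  have hnd : (PySem.List.sorted (PySem.Set.ofList xs) (fun x => toLex x) false).Nodup :=
    (PySem.List.sorted_perm (PySem.Set.ofList xs) (fun x => toLex x) false).nodup_iff.2
      (PySem.Set.nodup_ofList xs)
  exact (hnd.and hle).imp (fun h => lt_of_le_of_ne h.2 (fun he => h.1 (by
    simpa using congrArg (fun z => ofLex z) he)))

-- two-pointer merge of two strictly increasing lists = their intersection, in order
theorem pv_mem_merge (l1 l2 : List (String × String))
    (h1 : l1.Pairwise (fun a b => toLex a < toLex b))
    (h2 : l2.Pairwise (fun a b => toLex a < toLex b)) (q : String × String) :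
    q ∈ pvMerge l1 l2 ↔ q ∈ l1 ∧ q ∈ l2 := by
  induction l1, l2 using pvMerge.induct with
  | case1 l2 => simp [pvMerge]
  | case2 x xs => simp [pvMerge]
  | case3 xs y ys ih =>
    rw [List.pairwise_cons] at h1 h2
    have he : pvMerge (y :: xs) (y :: ys) = y :: pvMerge xs ys := by simp [pvMerge]
    rw [he]
    simp only [List.mem_cons, ih h1.2 h2.2]
    constructor
    · rintro (rfl | ⟨hx, hy⟩)
      · exact ⟨Or.inl rfl, Or.inl rfl⟩
      · exact ⟨Or.inr hx, Or.inr hy⟩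
    · rintro ⟨rfl | hx, hy | hy⟩
      · exact Or.inl rfl
      · exact Or.inl rfl
      · exact absurd (h1.1 q hx) (by simp [hy])
      · exact Or.inr ⟨hx, hy⟩
  | case4 x xs y ys hne hlt ih =>
    rw [List.pairwise_cons] at h1
    have he : pvMerge (x :: xs) (y :: ys) = pvMerge xs (y :: ys) := by
      simp [pvMerge, hne, hlt]
    rw [he, ih h1.2 h2]
    simp only [List.mem_cons]
    constructor
    · rintro ⟨hx, hy⟩
      exact ⟨Or.inr hx, hy⟩
    · rintro ⟨rfl | hx, hy⟩
      · rcases hy with rfl | hy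
        · exact absurd rfl hne
        · rw [List.pairwise_cons] at h2
          exact absurd (lt_trans hlt (h2.1 q hy)) (lt_irrefl _)
      · exact ⟨hx, hy⟩
  | case5 x xs y ys hne hnlt ih =>
    rw [List.pairwise_cons] at h2
    have hyx : toLex y < toLex x := by
      rcases lt_trichotomy (toLex x) (toLex y) with h | h | h
      · exact absurd h hnlt
      · exact absurd (by simpa using congrArg (fun z => ofLex z) h) hne
      · exact h
    have he : pvMerge (x :: xs) (y :: ys) = pvMerge (x :: xs) ys := by
      simp [pvMerge, hne, hnlt]
    rw [he, ih h1 h2.2]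
    simp only [List.mem_cons]
    constructor
    · rintro ⟨hx, hy⟩
      exact ⟨hx, Or.inr hy⟩
    · rintro ⟨hx, rfl | hy⟩
      · rcases hx with h | hx
        · exact absurd h.symm hne
        · rw [List.pairwise_cons] at h1
          exact absurd (h1.1 q hx) (not_lt_of_gt hyx)
      · exact ⟨hx, hy⟩

theorem pv_merge_pairwise (l1 l2 : List (String × String))
    (h1 : l1.Pairwise (fun a b => toLex a < toLex b))
    (h2 : l2.Pairwise (fun a b => toLex a < toLex b)) :
    (pvMerge l1 l2).Pairwise (fun a b => toLex a < toLex b) := by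
  induction l1, l2 using pvMerge.induct with
  | case1 l2 => simp [pvMerge]
  | case2 x xs => simp [pvMerge]
  | case3 xs y ys ih =>
    rw [List.pairwise_cons] at h1 h2
    have he : pvMerge (y :: xs) (y :: ys) = y :: pvMerge xs ys := by simp [pvMerge]
    rw [he]
    refine List.pairwise_cons.2 ⟨?_, ih h1.2 h2.2⟩
    intro q hq
    exact h1.1 q ((pv_mem_merge xs ys h1.2 h2.2 q).1 hq).1
  | case4 x xs y ys hne hlt ih =>
    rw [List.pairwise_cons] at h1
    have he : pvMerge (x :: xs) (y :: ys) = pvMerge xs (y :: ys) := by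
      simp [pvMerge, hne, hlt]
    rw [he]
    exact ih h1.2 h2
  | case5 x xs y ys hne hnlt ih =>
    rw [List.pairwise_cons] at h2
    have he : pvMerge (x :: xs) (y :: ys) = pvMerge (x :: xs) ys := by
      simp [pvMerge, hne, hnlt]
    rw [he]
    exact ih h1 h2.2

-- ===== VERDICT (by name: the statement is the Claim_ definition above) =====
theorem find_circular_pairs_spec : Claim_equal_find_circular_pairs := by
  intro adj _
  unfold Spec_find_circular_pairs find_circular_pairs find_circular_pairs_alt
  set edges := adj.foldl (fun ed p => p.2.foldl (fun ed tgt => PySem.Set.add ed (p.1, tgt)) ed)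
    PySem.Set.empty with hedges
  rw [pv_sorted2_eq_sorted_lex]
  simp only [pv_sorted2_eq_sorted_lex, pv_fbFold, List.nil_append]
  set F := adj.flatMap (fun p => (p.2.filter (fun t => p.1 ≤ t)).map (fun t => (p.1, t)))
  set B := adj.flatMap (fun p => (p.2.filter (fun t => t ≤ p.1)).map (fun t => (t, p.1)))
  have hF := pv_sortedSet_strict F
  have hB := pv_sortedSet_strict B
  apply PySem.List.sorted_eq_of_perm_of_pairwise_lt
  · -- the merge result is a permutation of A's pairs set
    apply (List.perm_ext_iff_of_nodup ?_ ?_).2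
    · intro q
      rw [pv_mem_merge _ _ hF hB q, PySem.List.mem_sorted, PySem.List.mem_sorted,
        PySem.Set.mem_ofList, PySem.Set.mem_ofList, pv_mem_fwd, pv_mem_bwd,
        pv_mem_foldl_addIf edges (fun ab => (ab.2, ab.1) ∈ edges)
          (fun ab => if ab.1 ≤ ab.2 then (ab.1, ab.2) else (ab.2, ab.1)) PySem.Set.empty q]
      have hmemE : ∀ e : String × String, e ∈ edges ↔ pvEdge adj e.1 e.2 := by
        intro e
        rw [hedges, pv_mem_edgesFold]
        unfold pvEdge
        constructor
        · rintro (h | ⟨p, hp, t, ht, rfl⟩)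
          · cases h
          · exact ⟨p.2, by simpa using hp, ht⟩
        · rintro ⟨ts, hts, hy⟩
          exact Or.inr ⟨(e.1, ts), hts, e.2, hy, rfl⟩
      constructor
      · rintro ⟨⟨hle, h12⟩, _, h21⟩
        refine Or.inr ⟨(q.1, q.2), (hmemE (q.1, q.2)).2 h12, (hmemE (q.2, q.1)).2 h21, ?_⟩
        simp [hle]
      · rintro (h | ⟨ab, hab, hrev, rfl⟩)
        · cases h
        · have h1 : pvEdge adj ab.1 ab.2 := (hmemE ab).1 hab
          have h2 : pvEdge adj ab.2 ab.1 := (hmemE (ab.2, ab.1)).1 hrev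
          by_cases hle : ab.1 ≤ ab.2
          · simp only [if_pos hle]
            exact ⟨⟨hle, h1⟩, hle, h2⟩
          · have hle' : ab.2 ≤ ab.1 := le_of_lt (lt_of_not_ge hle)
            simp only [if_neg hle]
            exact ⟨⟨hle', h2⟩, hle', h1⟩
    · exact (pv_merge_pairwise _ _ hF hB).imp (fun h => by
        intro he; rw [he] at h; exact lt_irrefl _ h)
    · exact pv_nodup_foldl_addIf edges (fun ab => (ab.2, ab.1) ∈ edges) _ PySem.Set.empty
        List.nodup_nil
  · exact pv_merge_pairwise _ _ hF hB
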